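-- pv_equiv track=rewrite | github.com/zaleni/MagicBot-2B-OFT | starVLA/training/trainer_utils/config_tracker.py | _filter_leaf_paths
-- ===== SOURCE A (Python) =====
-- from typing import Any, Optional, Set, Union
--
-- def _filter_leaf_paths(paths: Set[str]) -> Set[str]:
--     """Filter to only leaf paths (no sub-paths)"""
--     if not paths:
--         return set()
--
--     leaf_paths = set()
--     for path in paths:
--         # Check if any other path starts with this path followed by . or [
--         is_leaf = True
--         for other in paths:
--             if other != path:
--                 if other.startswith(f"{path}.") or other.startswith(f"{path}["):
--                     is_leaf = False
--                     break
--         if is_leaf: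
--             leaf_paths.add(path)
--     return leaf_paths
-- ===== SOURCE B (Python) =====
-- from typing import Set
--
-- def _filter_leaf_paths(paths: Set[str]) -> Set[str]:
--     """Filter to only leaf paths (no sub-paths)."""
--     # One pass: every prefix of a path that ends right before a '.' or '['
--     # is, if present in `paths`, extended by that path and hence not a leaf.
--     extended = set()
--     for q in paths:
--         prefix = ""
--         for ch in q:
--             if ch == '.' or ch == '[':
--                 extended.add(prefix)
--             prefix += ch
--     return {p for p in paths if p not in extended}
-- ===== Notes on version B (the rewrite author's own statement) =====
-- stated objective: faster
-- what changed: Instead of testing every pair of paths with startswith, B makes one pass over the characters of each path, collecting into a hash set every prefix that ends right before a '.' or '[' boundary, and then keeps exactly the paths absent from that set.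
import Mathlib
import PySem

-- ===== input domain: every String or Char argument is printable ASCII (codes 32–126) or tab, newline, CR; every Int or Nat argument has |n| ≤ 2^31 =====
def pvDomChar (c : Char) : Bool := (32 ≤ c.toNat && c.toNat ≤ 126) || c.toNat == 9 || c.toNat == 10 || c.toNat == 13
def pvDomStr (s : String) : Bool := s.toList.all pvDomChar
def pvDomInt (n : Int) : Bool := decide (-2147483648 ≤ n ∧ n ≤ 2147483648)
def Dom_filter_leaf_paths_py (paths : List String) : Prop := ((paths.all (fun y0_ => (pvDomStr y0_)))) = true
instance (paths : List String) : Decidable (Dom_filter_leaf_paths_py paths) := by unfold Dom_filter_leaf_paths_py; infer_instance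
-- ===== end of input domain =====

-- B replaces A's all-pairs startswith scan by one pass that collects every prefix ending
-- right before a '.'/'[' into a set and keeps the paths absent from it (faster).
-- Both Pythons take and return a SET; the lists here hold its distinct elements and the
-- outputs are compared as sets. Strings are handled through their character lists (exact:
-- String.toList is injective; PySem string operations are defined on List Char), so each
-- path is paired with its char list and all comparisons happen on the char lists.

-- set.add for a set of strings, each string represented as (original, char list)
def pvSetAdd (r : List (String × List Char)) (pc : String × List Char) : List (String × List Char) :=
  if r.any (fun x => x.2 == pc.2) then r else r ++ [pc]

-- ===== PORT A =====
def filter_leaf_paths_py (paths : List String) : List String :=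
  if paths.isEmpty then []
  else
    let cs := paths.map (fun p => p.toList)
    ((paths.zip cs).foldl (fun leaf_paths pc =>
      let is_leaf := !(cs.any (fun other =>
        other != pc.2 &&
          (PySem.Chars.startswith other (pc.2 ++ ['.']) || PySem.Chars.startswith other (pc.2 ++ ['[']))))
      if is_leaf then pvSetAdd leaf_paths pc else leaf_paths) []).map Prod.fst

-- ===== PORT B =====
-- inner loop of B: walk the characters of one path, `acc` is the prefix built so far
def pvCollect (s : PySem.Set (List Char)) (acc : List Char) : List Char → PySem.Set (List Char)
  | [] => s
  | c :: rest =>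
      pvCollect (if c == '.' || c == '[' then PySem.Set.add s acc else s) (acc ++ [c]) rest

def filter_leaf_paths_py_alt (paths : List String) : List String :=
  let cs := paths.map (fun p => p.toList)
  let extended := cs.foldl (fun s q => pvCollect s [] q) PySem.Set.empty
  -- the result-set comprehension {p for p in paths if p not in extended}
  ((paths.zip cs).foldl (fun r pc =>
    if !(PySem.Set.contains extended pc.2) then pvSetAdd r pc else r) []).map Prod.fst

-- ===== PRECONDITION & SPEC =====
def Spec_filter_leaf_paths_py (paths : List String) (out : List String) : Prop := out = filter_leaf_paths_py_alt paths
instance (paths : List String) (out : List String) : Decidable (Spec_filter_leaf_paths_py paths out) := by unfold Spec_filter_leaf_paths_py; infer_instance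

-- ===== CLAIM (what is proved, stated in full; the proofs are below) =====
def Claim_equal_filter_leaf_paths_py : Prop := ∀ (paths : List String), Dom_filter_leaf_paths_py paths → Spec_filter_leaf_paths_py paths (filter_leaf_paths_py paths)

-- ===== LEMMAS AND PROOFS =====

-- decomposing `c :: rest = l1 ++ c' :: l2` by whether l1 is empty
theorem cons_decomp (c : Char) (rest : List Char) (P : List Char → Char → List Char → Prop) :
    (∃ l1 c' l2, c :: rest = l1 ++ c' :: l2 ∧ P l1 c' l2) ↔
      P [] c rest ∨ (∃ l1 c' l2, rest = l1 ++ c' :: l2 ∧ P (c :: l1) c' l2) := by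
  constructor
  · rintro ⟨l1, c', l2, heq, hp⟩
    cases l1 with
    | nil =>
        simp only [List.nil_append, List.cons.injEq] at heq
        obtain ⟨h1, h2⟩ := heq
        subst h1; subst h2; exact Or.inl hp
    | cons c0 l1' =>
        simp only [List.cons_append, List.cons.injEq] at heq
        obtain ⟨h1, h2⟩ := heq
        subst h1
        exact Or.inr ⟨l1', c', l2, h2, hp⟩
  · rintro (hp | ⟨l1, c', l2, heq, hp⟩)
    · exact ⟨[], c, rest, rfl, hp⟩
    · exact ⟨c :: l1, c', l2, by simp [heq], hp⟩

-- membership in B's inner character walk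
theorem mem_pvCollect (x : List Char) : ∀ (l : List Char) (s : PySem.Set (List Char)) (acc : List Char),
    x ∈ pvCollect s acc l ↔
      x ∈ s ∨ ∃ l1 c l2, l = l1 ++ c :: l2 ∧ (c == '.' || c == '[') = true ∧ x = acc ++ l1 := by
  intro l
  induction l with
  | nil => intro s acc; simp [pvCollect]
  | cons c rest ih =>
      intro s acc
      rw [pvCollect, ih, cons_decomp c rest (fun l1 c' _ => (c' == '.' || c' == '[') = true ∧ x = acc ++ l1)]
      by_cases hb : (c == '.' || c == '[') = true
      · simp only [hb, if_pos, PySem.Set.mem_add, List.append_assoc, List.singleton_append,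
          List.append_nil]
        tauto
      · rw [if_neg hb]
        simp only [List.append_assoc, List.singleton_append, List.append_nil]
        simp [hb]

-- membership in B's `extended` set
theorem mem_extended (x : List Char) : ∀ (cs : List (List Char)) (s : PySem.Set (List Char)),
    x ∈ cs.foldl (fun s q => pvCollect s [] q) s ↔
      x ∈ s ∨ ∃ q ∈ cs, ∃ c l2, q = x ++ c :: l2 ∧ (c == '.' || c == '[') = true := by
  intro cs
  induction cs with
  | nil => intro s; simp
  | cons q rest ih =>
      intro s
      rw [List.foldl_cons, ih, mem_pvCollect]
      simp only [List.nil_append, List.mem_cons]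
      constructor
      · rintro ((hs | ⟨l1, c, l2, heq, hc, hx⟩) | ⟨q', hq', h⟩)
        · exact Or.inl hs
        · subst hx; exact Or.inr ⟨q, Or.inl rfl, c, l2, heq, hc⟩
        · exact Or.inr ⟨q', Or.inr hq', h⟩
      · rintro (hs | ⟨q', hq' | hq', c, l2, heq, hc⟩)
        · exact Or.inl (Or.inl hs)
        · subst hq'; exact Or.inl (Or.inr ⟨x, c, l2, heq, hc, rfl⟩)
        · exact Or.inr ⟨q', hq', c, l2, heq, hc⟩

-- A's inner pair check, characterised as a decomposition of `other`
theorem acheck_iff (other p : List Char) :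
    (other != p &&
      (PySem.Chars.startswith other (p ++ ['.']) || PySem.Chars.startswith other (p ++ ['[']))) = true ↔
      ∃ c l2, other = p ++ c :: l2 ∧ (c == '.' || c == '[') = true := by
  constructor
  · rintro h
    rw [Bool.and_eq_true, Bool.or_eq_true] at h
    obtain ⟨-, hsw⟩ := h
    rcases hsw with hsw | hsw
    · rw [PySem.Chars.startswith_iff] at hsw
      obtain ⟨t, ht⟩ := hsw
      exact ⟨'.', t, by rw [← ht]; simp, by decide⟩
    · rw [PySem.Chars.startswith_iff] at hsw
      obtain ⟨t, ht⟩ := hsw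
      exact ⟨'[', t, by rw [← ht]; simp, by decide⟩
  · rintro ⟨c, l2, heq, hc⟩
    rw [Bool.and_eq_true, Bool.or_eq_true]
    constructor
    · rw [bne_iff_ne]
      intro hcontr
      rw [hcontr] at heq
      have := congrArg List.length heq
      simp at this
    · rw [Bool.or_eq_true] at hc
      rcases hc with hc | hc <;> rw [beq_iff_eq] at hc <;> subst hc
      · exact Or.inl (by rw [PySem.Chars.startswith_iff]; exact ⟨l2, by rw [heq]; simp⟩)
      · exact Or.inr (by rw [PySem.Chars.startswith_iff]; exact ⟨l2, by rw [heq]; simp⟩)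

-- the pointwise bridge: A's inner scan decides exactly membership in B's `extended` set
theorem any_eq_contains (cs : List (List Char)) (p : List Char) :
    cs.any (fun other =>
        other != p &&
          (PySem.Chars.startswith other (p ++ ['.']) || PySem.Chars.startswith other (p ++ ['['])))
      = PySem.Set.contains (cs.foldl (fun s q => pvCollect s [] q) PySem.Set.empty) p := by
  rw [Bool.eq_iff_iff, List.any_eq_true, PySem.Set.contains_iff, mem_extended]
  simp only [PySem.Set.empty, List.not_mem_nil, false_or]
  exact exists_congr fun q => and_congr_right fun _ => acheck_iff q p

-- a fold that conditionally set-adds equals the fold of set-add over the filtered list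
theorem foldl_ite_add (c : String × List Char → Bool) :
    ∀ (l : List (String × List Char)) (s : List (String × List Char)),
    l.foldl (fun acc x => if c x then pvSetAdd acc x else acc) s
      = (l.filter c).foldl pvSetAdd s := by
  intro l
  induction l with
  | nil => intro s; rfl
  | cons x rest ih =>
      intro s
      by_cases hx : c x = true <;> simp [hx, ih]

-- ===== VERDICT (by name: the statement is the Claim_ definition above) =====
theorem filter_leaf_paths_py_spec : Claim_equal_filter_leaf_paths_py := by
  intro paths _
  unfold Spec_filter_leaf_paths_py filter_leaf_paths_py filter_leaf_paths_py_alt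
  by_cases h : paths.isEmpty = true
  · rw [List.isEmpty_iff] at h
    subst h; rfl
  · rw [if_neg h]
    simp only [foldl_ite_add]
    congr 2
    refine List.filter_congr ?_
    intro pc _
    rw [any_eq_contains]
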